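-- pv_equiv track=rewrite | github.com/snsnlou2/cpython | Lib/codecs.py | make_encoding_map
-- ===== SOURCE A (Python) =====
-- def make_encoding_map(decoding_map):
--     ' Creates an encoding map from a decoding map.\n\n        If a target mapping in the decoding map occurs multiple\n        times, then that target is mapped to None (undefined mapping),\n        causing an exception when encountered by the charmap codec\n        during translation.\n\n        One example where this happens is cp875.py which decodes\n        multiple character to \\u001a.\n\n    '
--     m = {}
--     for (k, v) in decoding_map.items():
--         if (not (v in m)):
--             m[v] = k
--         else:
--             m[v] = None
--     return m
-- ===== SOURCE B (Python) =====
-- def make_encoding_map(decoding_map):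
--     # Two-pass: count target values up front, then assign in one shaped pass.
--     counts = {}
--     for v in decoding_map.values():
--         counts[v] = counts.get(v, 0) + 1
--     m = {}
--     for (k, v) in decoding_map.items():
--         m[v] = k if counts[v] == 1 else None
--     return m
-- ===== Notes on version B (the rewrite author's own statement) =====
-- stated objective: alternative
-- what changed: Replaces A's incremental already-seen membership test with an up-front frequency table of the target values followed by a single unconditional assignment pass (m[v] = k iff v's total count is 1).
import Mathlib
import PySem

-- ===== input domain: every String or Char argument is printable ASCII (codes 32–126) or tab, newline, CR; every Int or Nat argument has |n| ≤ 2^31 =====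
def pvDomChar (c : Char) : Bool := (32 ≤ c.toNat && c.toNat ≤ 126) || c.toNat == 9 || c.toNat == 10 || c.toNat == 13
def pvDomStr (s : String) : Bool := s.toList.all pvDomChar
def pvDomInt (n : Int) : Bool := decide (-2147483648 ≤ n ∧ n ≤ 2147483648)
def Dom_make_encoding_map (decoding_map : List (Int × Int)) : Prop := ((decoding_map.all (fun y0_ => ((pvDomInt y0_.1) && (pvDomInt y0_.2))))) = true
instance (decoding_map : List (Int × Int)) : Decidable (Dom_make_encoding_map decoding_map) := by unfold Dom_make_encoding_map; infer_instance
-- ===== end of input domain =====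

-- B builds a frequency table of the target values first, then assigns in a single
-- unconditional pass (alternative decomposition, same O(n) cost); A tests membership incrementally.

-- ===== PORT A =====
def make_encoding_map (decoding_map : List (Int × Int)) : List (Int × Option Int) :=
  (decoding_map.foldl
    (fun m p => if !(m.contains p.2) then m.insert p.2 (some p.1) else m.insert p.2 none)
    PySem.Dict.empty).items

-- ===== PORT B =====
def make_encoding_map_alt (decoding_map : List (Int × Int)) : List (Int × Option Int) :=
  let counts : PySem.Dict Int Int :=
    (decoding_map.map (fun p => p.2)).foldl
      (fun d v => d.insert v (d.getD v 0 + 1)) PySem.Dict.empty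
  (decoding_map.foldl
    (fun m p => m.insert p.2 (if counts.getD p.2 0 == 1 then some p.1 else none))
    PySem.Dict.empty).items

-- ===== PRECONDITION & SPEC =====
def Spec_make_encoding_map (decoding_map : List (Int × Int)) (out : List (Int × Option Int)) : Prop := out = make_encoding_map_alt decoding_map
instance (decoding_map : List (Int × Int)) (out : List (Int × Option Int)) : Decidable (Spec_make_encoding_map decoding_map out) := by unfold Spec_make_encoding_map; infer_instance

-- ===== CLAIM (what is proved, stated in full; the proofs are below) =====
def Claim_equal_make_encoding_map : Prop := ∀ (decoding_map : List (Int × Int)), Dom_make_encoding_map decoding_map → Spec_make_encoding_map decoding_map (make_encoding_map decoding_map)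

-- ===== LEMMAS AND PROOFS =====

-- Invariant-carrying equality of the two folds.  `full` is the list of all target
-- values, `pC v` the number of occurrences of v already processed.
lemma fold_eq (full : List Int) :
    ∀ (rest : List (Int × Int)) (pC : Int → Nat) (dA dB : PySem.Dict Int (Option Int)),
      dA.keys = dB.keys →
      dA.keys.Nodup →
      (∀ v, v ∈ dA.keys ↔ 1 ≤ pC v) →
      (∀ v, pC v + (rest.map Prod.snd).count v = full.count v) →
      (∀ v, v ∈ dA.keys →
        (if v ∈ rest.map Prod.snd then dB.get? v = some none else dA.get? v = dB.get? v)) →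
      rest.foldl
        (fun m p => if !(m.contains p.2) then m.insert p.2 (some p.1) else m.insert p.2 none) dA
      = rest.foldl
        (fun m p => m.insert p.2 (if full.count p.2 = 1 then some p.1 else none)) dB := by
  intro rest
  induction rest with
  | nil =>
    intro pC dA dB hk hnd hiff hcnt hval
    simp only [List.foldl_nil]
    apply PySem.Dict.ext
    rw [PySem.Dict.items_eq_map_keys dA hnd none,
        PySem.Dict.items_eq_map_keys dB (hk ▸ hnd) none, ← hk]
    apply List.map_congr_left
    intro v hv
    have h := hval v hv
    simp only [List.map_nil, List.not_mem_nil, if_false] at h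
    rw [PySem.Dict.getD_eq_get?_getD, PySem.Dict.getD_eq_get?_getD, h]
  | cons p rest ih =>
    intro pC dA dB hk hnd hiff hcnt hval
    obtain ⟨k, v⟩ := p
    simp only [List.foldl_cons]
    have hcontains : dA.contains v = dB.contains v := by
      rw [PySem.Dict.contains_eq_decide_mem_keys, PySem.Dict.contains_eq_decide_mem_keys, hk]
    apply ih (fun w => pC w + (if w = v then 1 else 0))
    · by_cases h : dA.contains v = true
      · simp only [h, Bool.not_true, Bool.false_eq_true, if_false]
        rw [PySem.Dict.keys_insert_of_contains _ _ h,
            PySem.Dict.keys_insert_of_contains _ _ (hcontains ▸ h)]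
        exact hk
      · have h' : dA.contains v = false := by simpa using h
        simp only [h', Bool.not_false, if_true]
        rw [PySem.Dict.keys_insert_of_not_contains _ _ h',
            PySem.Dict.keys_insert_of_not_contains _ _ (hcontains ▸ h'), hk]
    · split
      · exact PySem.Dict.nodup_keys_insert _ _ _ hnd
      · exact PySem.Dict.nodup_keys_insert _ _ _ hnd
    · intro w
      have hmem : w ∈ (if !(dA.contains v) then dA.insert v (some k) else dA.insert v none).keys
          ↔ w = v ∨ w ∈ dA.keys := by
        split <;> exact PySem.Dict.mem_keys_insert _ _ _ _
      rw [hmem]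
      by_cases hw : w = v
      · simp [hw]
      · simp [hw, hiff w]
    · intro w
      have := hcnt w
      simp only [List.map_cons, List.count_cons] at this ⊢
      by_cases hw : w = v
      · subst hw; simp at this ⊢; omega
      · have hw2 : ¬ v = w := fun h => hw h.symm
        simp [hw, hw2] at this ⊢
        omega
    · intro w hw
      have hmem : w = v ∨ w ∈ dA.keys := by
        have : w ∈ (if !(dA.contains v) then dA.insert v (some k) else dA.insert v none).keys := hw
        revert this
        split <;> (intro h; exact (PySem.Dict.mem_keys_insert _ _ _ _).mp h)
      by_cases hwv : w = v
      · subst hwv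
        by_cases hrest : w ∈ rest.map Prod.snd
        · -- w occurs again later: B stored none, and total count ≠ 1
          simp only [hrest, if_true]
          have hne1 : full.count w ≠ 1 := by
            have := hcnt w
            have h1 : 1 ≤ (rest.map Prod.snd).count w := List.one_le_count_iff.mpr hrest
            simp only [List.map_cons, List.count_cons] at this
            simp at this
            omega
          rw [if_neg hne1]
          exact PySem.Dict.get?_insert_self _ _ _
        · -- last occurrence: the two stored values agree
          simp only [hrest, if_false]
          rw [PySem.Dict.get?_insert_self]
          by_cases hc : dA.contains w = true
          · -- seen before: count ≥ 2, both store none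
            have hne1 : full.count w ≠ 1 := by
              have hge : 1 ≤ pC w := (hiff w).mp (by
                rw [PySem.Dict.contains_eq_decide_mem_keys] at hc
                simpa using hc)
              have := hcnt w
              simp only [List.map_cons, List.count_cons] at this
              simp at this
              omega
            rw [if_neg hne1]
            simp only [hc, Bool.not_true, Bool.false_eq_true, if_false]
            rw [PySem.Dict.get?_insert_self]
          · -- first and only occurrence: count = 1, both store some k
            have hc' : dA.contains w = false := by simpa using hc
            have heq1 : full.count w = 1 := by
              have h0 : pC w = 0 := by
                have hnm : w ∉ dA.keys := by
                  rw [PySem.Dict.contains_eq_decide_mem_keys] at hc'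
                  simpa using hc'
                have : ¬ (1 ≤ pC w) := fun hge => hnm ((hiff w).mpr hge)
                omega
              have hr0 : (rest.map Prod.snd).count w = 0 :=
                List.count_eq_zero.mpr hrest
              have := hcnt w
              simp only [List.map_cons, List.count_cons] at this
              simp [hr0] at this
              omega
            rw [if_pos heq1]
            simp only [hc', Bool.not_false, if_true]
            rw [PySem.Dict.get?_insert_self]
      · -- untouched key
        have hwA : w ∈ dA.keys := hmem.resolve_left hwv
        have h := hval w hwA
        have hgA : (if !(dA.contains v) then dA.insert v (some k) else dA.insert v none).get? w
            = dA.get? w := by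
          split <;> exact PySem.Dict.get?_insert_of_ne _ _ hwv
        have hgB : ∀ (o : Option Int), (dB.insert v o).get? w = dB.get? w :=
          fun o => PySem.Dict.get?_insert_of_ne _ _ hwv
        simp only [List.map_cons, List.mem_cons, hwv, false_or] at h ⊢
        by_cases hrest : w ∈ rest.map Prod.snd
        · simp only [hrest, if_true] at h ⊢
          rw [hgB, h]
        · simp only [hrest, if_false] at h ⊢
          rw [hgA, hgB, h]

-- B's counting pass really computes the multiplicity of each target value.
lemma counts_getD (dm : List (Int × Int)) (w : Int) :
    ((dm.map (fun p => p.2)).foldl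
        (fun d v => d.insert v (d.getD v 0 + 1)) PySem.Dict.empty).getD w 0
      = ((dm.map Prod.snd).count w : Int) := by
  rw [PySem.Dict.getD_foldl_insert_add_one]
  simp

-- ===== VERDICT (by name: the statement is the Claim_ definition above) =====
theorem make_encoding_map_spec : Claim_equal_make_encoding_map := by
  intro dm _
  unfold Spec_make_encoding_map make_encoding_map make_encoding_map_alt
  simp only [counts_getD]
  have hfn : (fun (m : PySem.Dict Int (Option Int)) (p : Int × Int) =>
        m.insert p.2 (if (((dm.map Prod.snd).count p.2 : Int) == 1) then some p.1 else none))
      = (fun m p => m.insert p.2 (if (dm.map Prod.snd).count p.2 = 1 then some p.1 else none)) := by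
    funext m p
    congr 1
    by_cases h : (dm.map Prod.snd).count p.2 = 1 <;> simp [h]
  rw [hfn]
  congr 1
  exact fold_eq (dm.map Prod.snd) dm (fun _ => 0) PySem.Dict.empty PySem.Dict.empty
    rfl (by simp [PySem.Dict.keys_empty]) (by simp [PySem.Dict.keys_empty])
    (by intro v; simp) (by intro v hv; simp [PySem.Dict.keys_empty] at hv)
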